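-- pv_equiv track=rewrite | github.com/juan15377/TimeTables | src/models/database/components/export_functions/components/grid_formats/schedulegrid.py | lineas_fila
-- ===== SOURCE A (Python) =====
-- from typing import List
--
-- def split_vector_into_blocks(vector: List[bool]) -> List[List[int]]:
--     """
--     Splits a boolean vector into blocks of consecutive True values.
--
--     This function identifies sequences of consecutive True values in the input vector
--     and returns a list of blocks, where each block contains the indices (1-based) of
--     the True values in the sequence.
--
--     Args:
--         vector: A list of boolean values (True or False).
--
--     Returns:
--         A list of blocks, where each block is a list of indices (1-based) of consecutive True values.
--
--     Example:
--         >>> split_vector_into_blocks([True, True, False, True, False, True, True])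
--         [[1, 2], [4], [6, 7]]
--     """
--     blocks = []  # Stores the final list of blocks
--     current_block = []  # Temporarily stores indices of the current block
--     in_block = False  # Flag to track if we are inside a block of True values
--
--     for index, value in enumerate(vector):
--         if value:
--             # If the value is True, add its 1-based index to the current block
--             current_block.append(index + 1)
--             in_block = True
--             continue
--
--         if in_block:
--             # If we were in a block and encounter a False, finalize the current block
--             blocks.append(current_block)
--             current_block = []  # Reset the current block
--             in_block = False  # Reset the flag
--
--     # If there's an unfinished block at the end, add it to the list of blocks
--     if current_block:
--         blocks.append(current_block)
--
--     return blocks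
--
-- def lineas_fila(vector_bool):
--     valores = split_vector_into_blocks(vector_bool)
--     cadena = ""
--
--     for valor in valores:
--         primero = valor[0]
--         ultimo = valor[-1]
--         cadena += f" \\cline{{{primero}-{ultimo}}}"
--
--     return cadena
-- ===== SOURCE B (Python) =====
-- def lineas_fila(vector_bool):
--     # Single edge-detecting scan: no intermediate block list.
--     parts = []
--     start = None
--     for index, value in enumerate(vector_bool):
--         if value:
--             if start is None:
--                 start = index + 1
--         else:
--             if start is not None:
--                 parts.append(f" \\cline{{{start}-{index}}}")
--                 start = None
--     if start is not None:
--         parts.append(f" \\cline{{{start}-{len(vector_bool)}}}")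
--     return "".join(parts)
-- ===== Notes on version B (the rewrite author's own statement) =====
-- stated objective: simpler
-- what changed: Replaces the two-pass design (build an explicit list of index blocks, then format each block's first/last element) with one edge-detecting scan that only tracks the current run's start and emits each \cline fragment the moment the run ends.
import Mathlib
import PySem

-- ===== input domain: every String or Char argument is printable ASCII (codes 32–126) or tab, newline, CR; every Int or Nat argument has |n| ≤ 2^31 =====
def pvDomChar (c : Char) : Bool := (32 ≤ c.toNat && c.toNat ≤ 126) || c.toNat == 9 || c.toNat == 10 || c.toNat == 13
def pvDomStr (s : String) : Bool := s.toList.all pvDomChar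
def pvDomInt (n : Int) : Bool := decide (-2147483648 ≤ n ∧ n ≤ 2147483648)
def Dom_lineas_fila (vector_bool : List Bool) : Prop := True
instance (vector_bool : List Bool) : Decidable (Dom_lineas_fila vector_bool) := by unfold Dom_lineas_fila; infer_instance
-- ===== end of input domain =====

-- B replaces A's two passes (build the list of True-index blocks, then format each) with one
-- edge-detecting scan that tracks only the current run's start; objective: simpler.

-- ===== PORT A =====
-- the enumerate loop of split_vector_into_blocks, state (blocks, current_block, in_block)
def pvSvibLoop : List Bool → Nat → List (List Int) → List Int → Bool → List (List Int)
  | [], _, blocks, current, _ =>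
      -- post-loop: if current_block: blocks.append(current_block)
      if current = [] then blocks else blocks ++ [current]
  | value :: rest, index, blocks, current, in_block =>
      if value then
        pvSvibLoop rest (index + 1) blocks (current ++ [(index : Int) + 1]) true
      else if in_block then
        pvSvibLoop rest (index + 1) (blocks ++ [current]) [] false
      else
        pvSvibLoop rest (index + 1) blocks current in_block

def split_vector_into_blocks (vector : List Bool) : List (List Int) :=
  pvSvibLoop vector 0 [] [] false

def lineas_fila (vector_bool : List Bool) : String :=
  (split_vector_into_blocks vector_bool).foldl
    (fun cadena valor =>
      -- valor[0] / valor[-1]: every block is nonempty, so the .getD 0 default is unreachable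
      -- (Python would raise IndexError on an empty block, which never occurs)
      cadena ++ " \\cline{" ++ PySem.Int.toStr ((PySem.List.pyGet? valor 0).getD 0) ++ "-"
             ++ PySem.Int.toStr ((PySem.List.pyGet? valor (-1)).getD 0) ++ "}")
    ""

-- ===== PORT B =====
def pvAltFrag (s e : Int) : String :=
  " \\cline{" ++ PySem.Int.toStr s ++ "-" ++ PySem.Int.toStr e ++ "}"

-- B's single scan: state (start, parts); the base case is the post-loop flush with len(vector_bool)
def pvAltLoop : List Bool → Nat → Option Int → List String → List String
  | [], n, start, parts =>
      match start with
      | some s => parts ++ [pvAltFrag s (n : Int)]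
      | none => parts
  | value :: rest, index, start, parts =>
      if value then
        pvAltLoop rest (index + 1)
          (match start with | none => some ((index : Int) + 1) | some s => some s) parts
      else
        match start with
        | some s => pvAltLoop rest (index + 1) none (parts ++ [pvAltFrag s (index : Int)])
        | none => pvAltLoop rest (index + 1) none parts

def lineas_fila_alt (vector_bool : List Bool) : String :=
  PySem.Str.join "" (pvAltLoop vector_bool 0 none [])

-- ===== PRECONDITION & SPEC =====
def Spec_lineas_fila (vector_bool : List Bool) (out : String) : Prop := out = lineas_fila_alt vector_bool
instance (vector_bool : List Bool) (out : String) : Decidable (Spec_lineas_fila vector_bool out) := by unfold Spec_lineas_fila; infer_instance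

-- ===== CLAIM (what is proved, stated in full; the proofs are below) =====
def Claim_equal_lineas_fila : Prop := ∀ (vector_bool : List Bool), Dom_lineas_fila vector_bool → Spec_lineas_fila vector_bool (lineas_fila vector_bool)

-- ===== LEMMAS AND PROOFS =====

-- A's fragment for one block
def pvFragOf (valor : List Int) : String :=
  " \\cline{" ++ PySem.Int.toStr ((PySem.List.pyGet? valor 0).getD 0) ++ "-"
             ++ PySem.Int.toStr ((PySem.List.pyGet? valor (-1)).getD 0) ++ "}"

lemma fragOf_eq (valor : List Int) (s e : Int)
    (hh : valor.head? = some s) (hl : valor.getLast? = some e) :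
    pvFragOf valor = pvAltFrag s e := by
  cases valor with
  | nil => simp at hh
  | cons a t =>
    simp only [pvFragOf, pvAltFrag, PySem.List.pyGet?_zero_cons, PySem.List.pyGet?_neg_one, hl]
    simp only [List.head?_cons] at hh
    simp [hh]

lemma join_cons (x : String) (l : List String) :
    PySem.Str.join "" (x :: l) = x ++ PySem.Str.join "" l := by
  cases l <;>
    simp [PySem.Str.join, List.intercalate, PySem.Chars.join, String.ofList_append,
      String.ofList_toList]

lemma foldl_frag (l : List (List Int)) (a : String) :
    l.foldl (fun cadena valor =>
      cadena ++ " \\cline{" ++ PySem.Int.toStr ((PySem.List.pyGet? valor 0).getD 0) ++ "-"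
             ++ PySem.Int.toStr ((PySem.List.pyGet? valor (-1)).getD 0) ++ "}") a
      = a ++ PySem.Str.join "" (l.map pvFragOf) := by
  induction l generalizing a with
  | nil => simp [PySem.Str.join, PySem.Chars.join, List.intercalate]
  | cons x t ih =>
    rw [List.foldl_cons, ih]
    simp [join_cons, pvFragOf, String.append_assoc]

-- the invariant tying A's current_block to B's start
def pvInv (current : List Int) (start : Option Int) (index : Nat) : Prop :=
  (current = [] ∧ start = none) ∨
  (∃ s, start = some s ∧ current.head? = some s ∧ current.getLast? = some (index : Int))

lemma loop_eq : ∀ (rest : List Bool) (index : Nat) (blocks : List (List Int))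
    (current : List Int) (start : Option Int),
    pvInv current start index →
    pvAltLoop rest index start (blocks.map pvFragOf)
      = (pvSvibLoop rest index blocks current (!current.isEmpty)).map pvFragOf := by
  intro rest
  induction rest with
  | nil =>
    intro index blocks current start hinv
    rcases hinv with ⟨hc, hs⟩ | ⟨s, hs, hh, hl⟩
    · subst hc hs; simp [pvSvibLoop, pvAltLoop]
    · subst hs
      have hne : current ≠ [] := by rintro rfl; simp at hh
      simp [pvSvibLoop, pvAltLoop, hne, fragOf_eq current s (index : Int) hh hl]
  | cons v rest ih =>
    intro index blocks current start hinv
    cases v with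
    | true =>
      rcases hinv with ⟨hc, hs⟩ | ⟨s, hs, hh, hl⟩
      · subst hc hs
        simp only [pvSvibLoop, pvAltLoop, if_true]
        have h2 : (true : Bool) = (!([] ++ [(index : Int) + 1] : List Int).isEmpty) := by simp
        rw [h2]
        exact ih (index + 1) blocks ([] ++ [(index : Int) + 1]) (some ((index : Int) + 1))
          (Or.inr ⟨(index : Int) + 1, rfl, by simp, by push_cast; simp⟩)
      · subst hs
        simp only [pvSvibLoop, pvAltLoop, if_true]
        have h2 : (true : Bool) = (!(current ++ [(index : Int) + 1] : List Int).isEmpty) := by simp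
        rw [h2]
        refine ih (index + 1) blocks (current ++ [(index : Int) + 1]) (some s)
          (Or.inr ⟨s, rfl, ?_, ?_⟩)
        · cases current with
          | nil => simp at hh
          | cons a t => simpa using hh
        · push_cast; simp
    | false =>
      rcases hinv with ⟨hc, hs⟩ | ⟨s, hs, hh, hl⟩
      · subst hc hs
        simp only [pvSvibLoop, pvAltLoop, List.isEmpty_nil, Bool.not_true,
          Bool.false_eq_true, if_false]
        exact ih (index + 1) blocks [] none (Or.inl ⟨rfl, rfl⟩)
      · subst hs
        have hne : current ≠ [] := by rintro rfl; simp at hh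
        have hie : (!current.isEmpty) = true := by simp [hne]
        simp only [pvSvibLoop, pvAltLoop, hie, Bool.false_eq_true, if_false, if_true]
        have hmap : (blocks ++ [current]).map pvFragOf
            = blocks.map pvFragOf ++ [pvAltFrag s (index : Int)] := by
          simp [fragOf_eq current s (index : Int) hh hl]
        rw [← hmap]
        have h0 : (false : Bool) = (!([] : List Int).isEmpty) := by simp
        rw [h0]
        exact ih (index + 1) (blocks ++ [current]) [] none (Or.inl ⟨rfl, rfl⟩)

-- ===== VERDICT (by name: the statement is the Claim_ definition above) =====
theorem lineas_fila_spec : Claim_equal_lineas_fila := by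
  intro vb _
  unfold Spec_lineas_fila lineas_fila lineas_fila_alt split_vector_into_blocks
  have h := loop_eq vb 0 [] [] none (Or.inl ⟨rfl, rfl⟩)
  simp only [List.map_nil, List.isEmpty_nil, Bool.not_true] at h
  rw [foldl_frag, ← h]
  simp [PySem.Str.join]
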